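-- pv_equiv track=rewrite | github.com/Somto-Dera/py3_mis_proj | interview_qs/a_z/amazon_interview_q1.py | minimizeMemory
-- ===== SOURCE A (Python) =====
-- def minimizeMemory(processes, m):
--     # Write your code here
--     sum_of_list = sum(processes)
--     length_processes_list = len(processes)
--     min_mem = sum_of_list
--
--     for idx in range(0,length_processes_list - m):
--         deleted = 0
--
--         for item in range(idx, idx + m + 1):
--             deleted += processes[item]
--
--         if sum_of_list - deleted < min_mem:
--             min_mem = sum_of_list - deleted
--
--     return min_mem
-- ===== SOURCE B (Python) =====
-- def minimizeMemory(processes, m):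
--     n = len(processes)
--     total = sum(processes)
--     w = m + 1
--     if w <= 0 or n < w:
--         return total
--     pref = [0]
--     s = 0
--     for x in processes:
--         s += x
--         pref.append(s)
--     best = max(0, max(pref[i + w] - pref[i] for i in range(n - w + 1)))
--     return total - best
-- ===== Notes on version B (the rewrite author's own statement) =====
-- stated objective: faster
-- what changed: B precomputes a prefix-sum array in one pass and takes each window sum as one subtraction (max over windows), replacing A's inner loop that re-sums every window from scratch.
import Mathlib
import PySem

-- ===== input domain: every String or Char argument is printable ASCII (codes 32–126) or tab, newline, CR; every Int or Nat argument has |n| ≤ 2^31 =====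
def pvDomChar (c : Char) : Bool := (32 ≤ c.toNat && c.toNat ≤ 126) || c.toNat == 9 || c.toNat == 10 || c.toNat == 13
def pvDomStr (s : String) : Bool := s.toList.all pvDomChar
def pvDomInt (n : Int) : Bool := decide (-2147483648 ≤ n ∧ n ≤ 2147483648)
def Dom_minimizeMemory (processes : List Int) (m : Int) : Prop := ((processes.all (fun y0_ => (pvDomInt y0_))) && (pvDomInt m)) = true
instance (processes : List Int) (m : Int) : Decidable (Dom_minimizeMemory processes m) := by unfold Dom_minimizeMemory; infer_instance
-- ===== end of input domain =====

-- B replaces A's nested window-summing loops by a single prefix-sum pass, so each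
-- window sum is one subtraction (objective: faster).

-- ===== PORT A =====
def minimizeMemory (processes : List Int) (m : Int) : Int :=
  let sum_of_list := processes.sum
  let length_processes_list : Int := processes.length
  -- processes[item] is always in range on the iterated indices, so pyGetD's default 0 is never used
  (PySem.List.pyRange 0 (length_processes_list - m) 1).foldl
    (fun min_mem idx =>
      let deleted := (PySem.List.pyRange idx (idx + m + 1) 1).foldl
        (fun d item => d + PySem.List.pyGetD processes item 0) 0
      if sum_of_list - deleted < min_mem then sum_of_list - deleted else min_mem)
    sum_of_list

-- ===== PORT B =====
def minimizeMemory_alt (processes : List Int) (m : Int) : Int :=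
  let n : Int := processes.length
  let total := processes.sum
  let w := m + 1
  if w ≤ 0 ∨ n < w then total
  else
    -- pref = [0]; s = 0; for x in processes: s += x; pref.append(s)
    let pref := (processes.foldl (fun (st : List Int × Int) x =>
      (st.1 ++ [st.2 + x], st.2 + x)) ([0], 0)).1
    let sums := (PySem.List.pyRange 0 (n - w + 1) 1).map
      (fun i => PySem.List.pyGetD pref (i + w) 0 - PySem.List.pyGetD pref i 0)
    -- max over a generator that is provably nonempty here; getD's default is never used
    let best := max 0 ((PySem.List.max? sums id).getD 0)
    total - best

-- ===== PRECONDITION & SPEC =====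
def Spec_minimizeMemory (processes : List Int) (m : Int) (out : Int) : Prop := out = minimizeMemory_alt processes m
instance (processes : List Int) (m : Int) (out : Int) : Decidable (Spec_minimizeMemory processes m out) := by unfold Spec_minimizeMemory; infer_instance

-- ===== CLAIM (what is proved, stated in full; the proofs are below) =====
def Claim_equal_minimizeMemory : Prop := ∀ (processes : List Int) (m : Int), Dom_minimizeMemory processes m → Spec_minimizeMemory processes m (minimizeMemory processes m)

-- ===== LEMMAS AND PROOFS =====

-- pyGetD mapped over a subrange of indices is a contiguous sublist
lemma pv_map_pyGetD_range (xs : List Int) (a b : Int) (h0 : 0 ≤ a) (hab : a ≤ b)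
    (hb : b ≤ (xs.length : Int)) :
    (PySem.List.pyRange a b 1).map (fun j => PySem.List.pyGetD xs j 0)
      = (xs.drop a.toNat).take (b.toNat - a.toNat) := by
  apply List.ext_getElem
  · simp [PySem.List.length_pyRange_one]; omega
  · intro k h1 h2
    rw [List.getElem_map, PySem.List.getElem_pyRange_one,
        PySem.List.pyGetD_eq_getElem xs 0 (by omega)
          (by simp only [PySem.List.length_pyRange_one, List.length_map] at h1; omega),
        List.getElem_take, List.getElem_drop]
    congr 1
    simp only [List.length_map, PySem.List.length_pyRange_one] at h1
    omega

-- A's inner loop: sum of a window as a difference of prefix sums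
lemma pv_winfold (xs : List Int) (a b : Int) (h0 : 0 ≤ a) (hab : a ≤ b)
    (hb : b ≤ (xs.length : Int)) :
    (PySem.List.pyRange a b 1).foldl (fun d item => d + PySem.List.pyGetD xs item 0) 0
      = (xs.take b.toNat).sum - (xs.take a.toNat).sum := by
  rw [PySem.List.foldl_add, pv_map_pyGetD_range xs a b h0 hab hb]
  set k := b.toNat - a.toNat with hkdef
  have hbt : b.toNat = a.toNat + k := by omega
  rw [hbt, List.take_add, List.sum_append]
  ring

-- B's prefix-list loop, generalized invariant
lemma pv_prefFold_aux (xs : List Int) : ∀ (acc : List Int) (s : Int),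
    (xs.foldl (fun (st : List Int × Int) x => (st.1 ++ [st.2 + x], st.2 + x)) (acc, s)).1
      = acc ++ (List.range xs.length).map (fun j => s + (xs.take (j+1)).sum) := by
  induction xs with
  | nil => intro acc s; simp
  | cons x t ih =>
    intro acc s
    simp only [List.foldl_cons]
    rw [ih]
    rw [List.length_cons, List.range_succ_eq_map, List.map_cons, List.map_map]
    simp only [List.take_succ_cons, List.sum_cons, List.take_zero, List.sum_nil, add_zero,
      List.append_assoc, List.singleton_append]
    congr 1
    congr 1
    apply List.map_congr_left
    intro j _
    simp [Function.comp]
    ring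

lemma pv_prefFold (xs : List Int) :
    (xs.foldl (fun (st : List Int × Int) x => (st.1 ++ [st.2 + x], st.2 + x)) ([0], 0)).1
      = (List.range (xs.length + 1)).map (fun j => (xs.take j).sum) := by
  rw [pv_prefFold_aux, List.range_succ_eq_map, List.map_cons, List.map_map]
  simp only [List.take_zero, List.sum_nil, List.singleton_append]
  congr 1
  apply List.map_congr_left
  intro j _
  simp [Function.comp]

-- reading the prefix list at an in-range index
lemma pv_pref_get (xs : List Int) (j : Int) (h0 : 0 ≤ j) (hj : j ≤ (xs.length : Int)) :
    PySem.List.pyGetD ((List.range (xs.length + 1)).map (fun t => (xs.take t).sum)) j 0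
      = (xs.take j.toNat).sum := by
  rw [PySem.List.pyGetD_eq_getElem _ _ h0 (by simp; omega)]
  simp

-- the running-minimum fold of "total - x" is total minus the running maximum
lemma pv_minfold (total : Int) (L : List Int) : ∀ c : Int,
    L.foldl (fun acc x => if total - x < acc then total - x else acc) (total - c)
      = total - L.foldl max c := by
  induction L with
  | nil => intro c; simp
  | cons x t ih =>
    intro c
    simp only [List.foldl_cons]
    have h : (if total - x < total - c then total - x else total - c) = total - max c x := by
      rcases le_total x c with h | h
      · rw [max_eq_left h]
        have : ¬ (total - x < total - c) := by omega
        simp [this]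
      · rw [max_eq_right h]
        split_ifs with hlt
        · rfl
        · have : x = c := by omega
          simp [this]
    rw [h, ih]

-- max? seen through its foldl, once the accumulator is some
lemma pv_maxq_cons (x : Int) (t : List Int) :
    PySem.List.max? (x :: t) id = some (t.foldl max x) := by
  induction t generalizing x with
  | nil => rfl
  | cons y t ih =>
    have h1 : PySem.List.max? (x :: y :: t) id
        = PySem.List.max? ((if x < y then y else x) :: t) id := by
      simp only [PySem.List.max?, List.foldl_cons, id_eq]
      rcases lt_or_ge x y with h | h
      · simp [h]
      · simp [not_lt.mpr h]
    rw [h1, ih]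
    simp only [List.foldl_cons]
    congr 1
    rcases lt_or_ge x y with h | h
    · rw [if_pos h, max_eq_right h.le]
    · rw [if_neg (not_lt.mpr h), max_eq_left h]

-- max distributes into a max-foldl
lemma pv_max_foldl (t : List Int) : ∀ (c a : Int),
    max c (t.foldl max a) = t.foldl max (max c a) := by
  induction t with
  | nil => intro c a; simp
  | cons x t ih =>
    intro c a
    simp only [List.foldl_cons]
    rw [ih, max_assoc]

lemma pv_replicate_maxfold (k : Nat) : (List.replicate k (0:Int)).foldl max 0 = 0 := by
  induction k with
  | zero => simp
  | succ k ih => simp [List.replicate_succ, ih]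

-- ===== VERDICT (by name: the statement is the Claim_ definition above) =====
theorem minimizeMemory_spec : Claim_equal_minimizeMemory := by
  intro processes m _
  unfold Spec_minimizeMemory minimizeMemory minimizeMemory_alt
  simp only []
  set total := processes.sum with htotal
  set n : Int := (processes.length : Int) with hn
  by_cases hcase : m + 1 ≤ 0 ∨ n < m + 1
  · rw [if_pos hcase]
    rcases hcase with hw | hlt
    · -- window size ≤ 0: every inner range is empty, deleted = 0, the fold keeps total
      rw [show (PySem.List.pyRange 0 (n - m) 1).foldl
            (fun min_mem idx =>
              if total - (PySem.List.pyRange idx (idx + m + 1) 1).foldl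
                  (fun d item => d + PySem.List.pyGetD processes item 0) 0 < min_mem
              then total - (PySem.List.pyRange idx (idx + m + 1) 1).foldl
                  (fun d item => d + PySem.List.pyGetD processes item 0) 0
              else min_mem) total
          = ((PySem.List.pyRange 0 (n - m) 1).map
              (fun idx => (PySem.List.pyRange idx (idx + m + 1) 1).foldl
                (fun d item => d + PySem.List.pyGetD processes item 0) 0)).foldl
              (fun acc x => if total - x < acc then total - x else acc) total
          from (List.foldl_map
            (f := fun idx => (PySem.List.pyRange idx (idx + m + 1) 1).foldl
              (fun d item => d + PySem.List.pyGetD processes item 0) 0)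
            (g := fun acc x => if total - x < acc then total - x else acc)).symm]
      have hmap : (PySem.List.pyRange 0 (n - m) 1).map
          (fun idx => (PySem.List.pyRange idx (idx + m + 1) 1).foldl
            (fun d item => d + PySem.List.pyGetD processes item 0) 0)
          = (PySem.List.pyRange 0 (n - m) 1).map (fun _ => (0:Int)) := by
        apply List.map_congr_left
        intro idx _
        rw [PySem.List.pyRange_one_eq_nil (by omega)]
        rfl
      rw [hmap, List.map_const']
      have h5 := pv_minfold total
        (List.replicate (PySem.List.pyRange 0 (n - m) 1).length (0:Int)) 0
      simp only [sub_zero] at h5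
      rw [h5, pv_replicate_maxfold, sub_zero]
    · -- window does not fit: the outer range is empty
      rw [PySem.List.pyRange_one_eq_nil (by omega)]
      rfl
  · rw [if_neg hcase]
    rw [not_or] at hcase
    obtain ⟨hw', hwn'⟩ := hcase
    have hw : 0 < m + 1 := by omega
    have hwn : m + 1 ≤ n := by omega
    -- 0 < m + 1 and m + 1 ≤ n
    rw [pv_prefFold]
    set K := n - (m + 1) + 1 with hK
    have hKnm : n - m = K := by omega
    have hg : (PySem.List.pyRange 0 K 1).map
        (fun i => PySem.List.pyGetD ((List.range (processes.length + 1)).map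
            (fun t => (processes.take t).sum)) (i + (m + 1)) 0
          - PySem.List.pyGetD ((List.range (processes.length + 1)).map
            (fun t => (processes.take t).sum)) i 0)
        = (PySem.List.pyRange 0 K 1).map
            (fun i => (processes.take (i + (m+1)).toNat).sum - (processes.take i.toNat).sum) := by
      apply List.map_congr_left
      intro i hi
      rw [PySem.List.mem_pyRange_one] at hi
      rw [pv_pref_get processes (i + (m+1)) (by omega) (by omega),
          pv_pref_get processes i (by omega) (by omega)]
    rw [hg]
    -- rewrite A's fold over indices as a fold over the same list of window sums
    rw [show (PySem.List.pyRange 0 (n - m) 1).foldl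
          (fun min_mem idx =>
            if total - (PySem.List.pyRange idx (idx + m + 1) 1).foldl
                (fun d item => d + PySem.List.pyGetD processes item 0) 0 < min_mem
            then total - (PySem.List.pyRange idx (idx + m + 1) 1).foldl
                (fun d item => d + PySem.List.pyGetD processes item 0) 0
            else min_mem) total
        = ((PySem.List.pyRange 0 (n - m) 1).map
            (fun idx => (PySem.List.pyRange idx (idx + m + 1) 1).foldl
              (fun d item => d + PySem.List.pyGetD processes item 0) 0)).foldl
            (fun acc x => if total - x < acc then total - x else acc) total
        from (List.foldl_map
          (f := fun idx => (PySem.List.pyRange idx (idx + m + 1) 1).foldl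
            (fun d item => d + PySem.List.pyGetD processes item 0) 0)
          (g := fun acc x => if total - x < acc then total - x else acc)).symm]
    have hmap : (PySem.List.pyRange 0 (n - m) 1).map
        (fun idx => (PySem.List.pyRange idx (idx + m + 1) 1).foldl
          (fun d item => d + PySem.List.pyGetD processes item 0) 0)
        = (PySem.List.pyRange 0 K 1).map
            (fun i => (processes.take (i + (m+1)).toNat).sum - (processes.take i.toNat).sum) := by
      rw [hKnm]
      apply List.map_congr_left
      intro idx hidx
      rw [PySem.List.mem_pyRange_one] at hidx
      rw [pv_winfold processes idx (idx + m + 1) (by omega) (by omega) (by omega)]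
      have h7 : idx + (m + 1) = idx + m + 1 := by ring
      rw [h7]
    rw [hmap]
    -- both sides are now about the same list S of window sums
    set g : Int → Int := fun i => (processes.take (i + (m+1)).toNat).sum - (processes.take i.toNat).sum with hgdef
    have hKpos : 0 < K := by omega
    rw [PySem.List.pyRange_one_cons hKpos, List.map_cons]
    rw [pv_maxq_cons]
    simp only [Option.getD_some]
    rw [pv_max_foldl]
    have h5 := pv_minfold total (g 0 :: (PySem.List.pyRange (0+1) K 1).map g) 0
    simp only [sub_zero] at h5
    rw [h5]
    simp only [List.foldl_cons]
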